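-- pv_equiv track=rewrite | github.com/crescentfull/cotingTest | 프로그래머스/2/131127. 할인 행사/할인 행사.py | solution
-- ===== SOURCE A (Python) =====
-- def solution(want, number, discount):
--     # 1. 필요한 제품들의 빈도 수 딕셔너리 만들기
--     need = {}
--     for w, num in zip(want, number):
--         need[w] = num
--
--     # 결과(가능한 시작 일자 수)
--     answer = 0
--
--     # 할인 리스트의 총 길이
--     n = len(discount)
--     # 만약 discount가 10일 미만이면 바로 0 반환
--     if n < 10:
--         return 0
--
--     # 2. 0 ~ n-10까지 슬라이딩 윈도우 이동
--     for start_idx in range(n - 10 + 1):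
--         # start_idx 부터 start_idx+9까지 10일간 구매할 제품 목록
--         window = discount[start_idx:start_idx+10]
--
--         # 윈도우 내 제품 빈도 수 세기
--         current_freq = {}
--         for item in window:
--             current_freq[item] = current_freq.get(item, 0) + 1
--
--         # 3. need 조건 충족 여부 확인
--         #    모든 제품에 대해 current_freq가 need보다 크거나 같은지 검사
--         can_buy_all = True
--         for item, required_count in need.items():
--             # 윈도우에 해당 item이 없거나, 수량이 부족하면 실패
--             if current_freq.get(item, 0) < required_count:
--                 can_buy_all = False
--                 break
--
--         if can_buy_all:
--             answer += 1
--
--     return answer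
-- ===== SOURCE B (Python) =====
-- def solution(want, number, discount):
--     need = {}
--     for w, num in zip(want, number):
--         need[w] = num
--     n = len(discount)
--     m = n - 9
--     if m <= 0:
--         return 0
--     good = [True] * m
--     for k, req in need.items():
--         if not any(good):
--             break
--         # prefix counts of item k over discount
--         pref = [0]
--         c = 0
--         for d in discount:
--             c += (d == k)
--             pref.append(c)
--         good = [g and pref[s + 10] - pref[s] >= req for s, g in enumerate(good)]
--     return sum(good)
-- ===== Notes on version B (the rewrite author's own statement) =====
-- stated objective: alternative
-- what changed: B inverts the loop structure: instead of rebuilding a frequency dict for every 10-day window and checking all needs per window, B loops over the need items once (stopping early once no window is still viable), builds a prefix-count array per needed item, and intersects per-item feasibility into one boolean array over window starts.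
import Mathlib
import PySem

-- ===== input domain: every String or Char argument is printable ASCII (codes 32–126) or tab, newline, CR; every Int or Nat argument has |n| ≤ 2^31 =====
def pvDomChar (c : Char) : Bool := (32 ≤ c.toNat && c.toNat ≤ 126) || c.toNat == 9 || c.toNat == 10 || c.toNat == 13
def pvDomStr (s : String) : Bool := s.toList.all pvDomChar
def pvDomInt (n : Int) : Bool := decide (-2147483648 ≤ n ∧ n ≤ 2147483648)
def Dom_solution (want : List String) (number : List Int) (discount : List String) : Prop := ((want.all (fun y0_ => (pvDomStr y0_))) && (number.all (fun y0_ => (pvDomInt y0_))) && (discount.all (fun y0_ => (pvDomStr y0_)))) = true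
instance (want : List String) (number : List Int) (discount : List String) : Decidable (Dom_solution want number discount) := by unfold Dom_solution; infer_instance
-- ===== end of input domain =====

-- B replaces A's per-window frequency-dict rebuild with one prefix-count array per needed
-- item intersected into a boolean array over window starts (alternative decomposition).

-- ===== PORT A =====
-- the 'for item, required_count in need.items(): … break' loop of A
def canBuyAllA : List (String × Int) → PySem.Dict String Int → Bool
  | [], _ => true
  | (k, v) :: rest, freq => if freq.getD k 0 < v then false else canBuyAllA rest freq

def solution (want : List String) (number : List Int) (discount : List String) : Int :=
  let need : PySem.Dict String Int :=
    (want.zip number).foldl (fun d p => d.insert p.1 p.2) PySem.Dict.empty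
  let n : Int := discount.length
  if n < 10 then 0
  else
    (PySem.List.pyRange 0 (n - 10 + 1) 1).foldl (fun answer s =>
      let window := PySem.List.slice discount (some s) (some (s + 10))
      let freq := window.foldl (fun d item => d.insert item (d.getD item 0 + 1)) PySem.Dict.empty
      if canBuyAllA need.items freq then answer + 1 else answer) 0

-- ===== PORT B =====
-- the 'for k, req in need.items(): if not any(good): break; ...' loop of B
def goodLoopB (discount : List String) : List (String × Int) → List Bool → List Bool
  | [], good => good
  | kv :: items, good =>
    if !(good.any (fun b => b)) then good
    else
      -- pref[i] = count of kv.1 among the first i discount days (python appends to a list)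
      let pref : List Int := (discount.foldl
        (fun (st : Int × List Int) d =>
          let c := st.1 + (if d == kv.1 then 1 else 0)
          (c, st.2 ++ [c])) ((0 : Int), [(0 : Int)])).2
      -- pref[s+10] / pref[s]: indices are always in range (pref has length n+1, s+10 ≤ n)
      goodLoopB discount items ((PySem.List.enumerate good 0).map (fun sg =>
        sg.2 && decide (PySem.List.pyGetD pref (sg.1 + 10) 0 - PySem.List.pyGetD pref sg.1 0 ≥ kv.2)))

def solution_alt (want : List String) (number : List Int) (discount : List String) : Int :=
  let need : PySem.Dict String Int :=
    (want.zip number).foldl (fun d p => d.insert p.1 p.2) PySem.Dict.empty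
  let n : Int := discount.length
  let m : Int := n - 9
  if m ≤ 0 then 0
  else
    let good := goodLoopB discount need.items (List.replicate m.toNat true)
    good.foldl (fun a b => a + if b then 1 else 0) 0

-- ===== PRECONDITION & SPEC =====
def Spec_solution (want : List String) (number : List Int) (discount : List String) (out : Int) : Prop := out = solution_alt want number discount
instance (want : List String) (number : List Int) (discount : List String) (out : Int) : Decidable (Spec_solution want number discount out) := by unfold Spec_solution; infer_instance

-- ===== CLAIM (what is proved, stated in full; the proofs are below) =====
def Claim_equal_solution : Prop := ∀ (want : List String) (number : List Int) (discount : List String), Dom_solution want number discount → Spec_solution want number discount (solution want number discount)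

-- ===== LEMMAS AND PROOFS =====

-- the dict 'need' that both programs build
def needD (want : List String) (number : List Int) : PySem.Dict String Int :=
  (want.zip number).foldl (fun d p => d.insert p.1 p.2) PySem.Dict.empty

-- proof-side name for the prefix-count list B builds for one key
def prefL (discount : List String) (k : String) : List Int :=
  (discount.foldl (fun (st : Int × List Int) d =>
      let c := st.1 + (if d == k then 1 else 0)
      (c, st.2 ++ [c])) ((0 : Int), [(0 : Int)])).2

-- proof-side name for B's per-key update of the boolean array
def stepB (discount : List String) (good : List Bool) (kv : String × Int) : List Bool :=
  (PySem.List.enumerate good 0).map (fun sg =>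
    sg.2 && decide (PySem.List.pyGetD (prefL discount kv.1) (sg.1 + 10) 0
                    - PySem.List.pyGetD (prefL discount kv.1) sg.1 0 ≥ kv.2))

def condKV (discount : List String) (kv : String × Int) (j : Nat) : Bool :=
  decide ((prefL discount kv.1).getD (j + 10) 0 - (prefL discount kv.1).getD j 0 ≥ kv.2)

lemma canBuyAllA_eq (items : List (String × Int)) (freq : PySem.Dict String Int) :
    canBuyAllA items freq = items.all (fun kv => decide (kv.2 ≤ freq.getD kv.1 0)) := by
  induction items with
  | nil => rfl
  | cons kv rest ih =>
    obtain ⟨k, v⟩ := kv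
    simp only [canBuyAllA, List.all_cons]
    split_ifs with h
    · simp [show ¬ (v ≤ freq.getD k 0) by omega]
    · simp [ih, show v ≤ freq.getD k 0 by omega]

lemma prefFold (k : String) (l : List String) : ∀ (c : Int) (p : List Int),
    (l.foldl (fun (st : Int × List Int) d =>
        let c := st.1 + (if d == k then 1 else 0)
        (c, st.2 ++ [c])) (c, p)).2
    = p ++ (List.range l.length).map (fun i => c + ((l.take (i+1)).count k : Int)) := by
  induction l with
  | nil => simp
  | cons d l ih =>
    intro c p
    simp only [List.foldl_cons]
    rw [ih]
    rw [List.length_cons, List.range_succ_eq_map, List.map_cons, List.map_map,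
        List.append_assoc, List.singleton_append]
    congr 1
    congr 1
    · simp only [List.take_succ_cons, List.take_zero, List.count_cons, List.count_nil]
      split_ifs <;> simp
    · apply List.map_congr_left
      intro i _
      simp only [Function.comp_apply, List.take_succ_cons, List.count_cons]
      push_cast
      split_ifs <;> ring

lemma prefL_eq (discount : List String) (k : String) :
    prefL discount k
    = (List.range (discount.length + 1)).map (fun i => ((discount.take i).count k : Int)) := by
  rw [prefL, prefFold]
  rw [List.range_succ_eq_map, List.map_cons, List.map_map]
  simp [Function.comp]

lemma prefL_getD (discount : List String) (k : String) (j : Nat) (h : j ≤ discount.length) :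
    (prefL discount k).getD j 0 = ((discount.take j).count k : Int) := by
  rw [prefL_eq]
  rw [List.getD_eq_getElem?_getD]
  simp [List.getElem?_map, List.getElem?_range, Nat.lt_succ_of_le h]

lemma stepB_length (discount : List String) (good : List Bool) (kv : String × Int) :
    (stepB discount good kv).length = good.length := by
  simp [stepB, PySem.List.length_enumerate]

lemma stepB_get? (discount : List String) (good : List Bool) (kv : String × Int)
    (j : Nat) (hj : j < good.length) :
    (stepB discount good kv)[j]? = some (good[j] && condKV discount kv j) := by
  have hj' : j < (stepB discount good kv).length := by rw [stepB_length]; exact hj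
  rw [List.getElem?_eq_getElem hj']
  simp only [stepB, List.getElem_map, PySem.List.getElem_enumerate, condKV]
  have h1 : (0 : Int) + (j : Int) + 10 = ((j + 10 : Nat) : Int) := by push_cast; ring
  have h2 : (0 : Int) + (j : Int) = ((j : Nat) : Int) := by push_cast; ring
  rw [h1, h2, PySem.List.pyGetD_natCast, PySem.List.pyGetD_natCast]

lemma goodLoopB_eq_cons (discount : List String) (kv : String × Int)
    (items : List (String × Int)) (good : List Bool) :
    goodLoopB discount (kv :: items) good
      = if !(good.any (fun b => b)) then good
        else goodLoopB discount items (stepB discount good kv) := rfl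

lemma goodLoopB_length (discount : List String) (items : List (String × Int)) :
    ∀ (good : List Bool), (goodLoopB discount items good).length = good.length := by
  induction items with
  | nil => intro good; rfl
  | cons kv items ih =>
    intro good
    rw [goodLoopB_eq_cons]
    split_ifs with h
    · rfl
    · rw [ih, stepB_length]

lemma goodLoopB_get? (discount : List String) (items : List (String × Int)) :
    ∀ (good : List Bool) (j : Nat) (hj : j < good.length),
    (goodLoopB discount items good)[j]?
      = some (good[j] && items.all (fun kv => condKV discount kv j)) := by
  induction items with
  | nil =>
    intro good j hj
    rw [show goodLoopB discount [] good = good from rfl, List.getElem?_eq_getElem hj]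
    simp
  | cons kv items ih =>
    intro good j hj
    rw [goodLoopB_eq_cons]
    split_ifs with hany
    · -- all entries are already false: the loop stops, and the conjunction is false anyway
      have hgf : good[j] = false := by
        rw [Bool.not_eq_eq_eq_not, Bool.not_true, List.any_eq_false] at hany
        exact Bool.eq_false_iff.mpr (fun ht => (hany good[j] (List.getElem_mem hj)) ht)
      rw [List.getElem?_eq_getElem hj, hgf, Bool.false_and]
    · have hj2 : j < (stepB discount good kv).length := by rw [stepB_length]; exact hj
      rw [ih (stepB discount good kv) j hj2]
      have h1 : (stepB discount good kv)[j]'hj2 = (good[j] && condKV discount kv j) := by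
        have h := stepB_get? discount good kv j hj
        rwa [List.getElem?_eq_getElem hj2, Option.some_inj] at h
      rw [h1]
      simp [Bool.and_assoc]

lemma sumBool (l : List Bool) : ∀ (a : Int),
    l.foldl (fun a b => a + if b then 1 else 0) a = a + (l.countP id : Int) := by
  induction l with
  | nil => simp
  | cons b l ih =>
    intro a
    simp only [List.foldl_cons, List.countP_cons, ih]
    cases b <;> simp <;> ring

lemma foldlCountIf (p : Int → Bool) (l : List Int) : ∀ (a : Int),
    l.foldl (fun ans s => if p s then ans + 1 else ans) a = a + (l.countP p : Int) := by
  induction l with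
  | nil => simp
  | cons x l ih =>
    intro a
    simp only [List.foldl_cons, List.countP_cons, ih]
    cases h : p x <;> simp <;> ring

-- the final boolean array B produces, as a map over window starts
lemma goodFinal (discount : List String) (items : List (String × Int)) (M : Nat) :
    goodLoopB discount items (List.replicate M true)
      = (List.range M).map (fun j => items.all (fun kv => condKV discount kv j)) := by
  apply List.ext_getElem?
  intro j
  by_cases hj : j < M
  · rw [goodLoopB_get? discount items _ j (by simpa using hj)]
    simp [List.getElem?_map, List.getElem?_range, hj]
  · have h1 : (goodLoopB discount items (List.replicate M true)).length ≤ j := by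
      rw [goodLoopB_length]; simp; omega
    rw [List.getElem?_eq_none h1, List.getElem?_eq_none (by simp; omega)]

-- ===== VERDICT (by name: the statement is the Claim_ definition above) =====
theorem solution_spec : Claim_equal_solution := by
  intro want number discount _
  unfold Spec_solution
  by_cases hn : (discount.length : Int) < 10
  · simp [solution, solution_alt, hn, show (discount.length : Int) - 9 ≤ 0 by omega]
  · have hB : solution_alt want number discount
        = if (discount.length : Int) - 9 ≤ 0 then 0
          else (goodLoopB discount (needD want number).items
                  (List.replicate ((discount.length : Int) - 9).toNat true)).foldl
                  (fun a b => a + if b then 1 else 0) 0 := rfl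
    rw [hB, if_neg (by omega)]
    rw [sumBool, goodFinal]
    -- A side
    simp only [solution, if_neg hn, canBuyAllA_eq,
      PySem.Dict.foldl_insert_getD_add_one_eq_counter, PySem.Dict.getD_counter]
    rw [foldlCountIf]
    rw [PySem.List.pyRange_one, List.countP_map, List.countP_map]
    simp only [zero_add]
    rw [show (want.zip number).foldl (fun d p => d.insert p.1 p.2) PySem.Dict.empty
          = needD want number from rfl]
    congr 1
    have hM : (((discount.length : Int) - 10 + 1) - 0).toNat = ((discount.length : Int) - 9).toNat := by
      omega
    rw [hM]
    apply List.countP_congr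
    intro j hj
    rw [List.mem_range] at hj
    have hj10 : j + 10 ≤ discount.length := by omega
    simp only [Function.comp_apply, id_eq]
    refine Iff.of_eq (congrArg (fun p => ((needD want number).items.all p) = true) (funext fun kv => ?_))
    have hs : PySem.List.slice discount (some ((j : Nat) : Int)) (some (((j : Nat) : Int) + 10))
        = (discount.drop j).take 10 := by
      rw [show (((j : Nat) : Int) + 10) = (((j : Nat) : Int) + ((10 : Nat) : Int)) from by norm_num,
          PySem.List.slice_natCast_add]
    rw [hs]
    rw [condKV, prefL_getD _ _ _ hj10, prefL_getD _ _ _ (by omega),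
        List.take_add, List.count_append]
    simp only [decide_eq_decide]
    push_cast
    omega
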